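-- pv_equiv track=rewrite | github.com/danieldawan/nlp-project | NLP.py | count_bigrams
-- ===== SOURCE A (Python) =====
-- def count_bigrams(corpus):
--     """
--     Counts occurrences of bigrams (pairs of consecutive words) in the corpus.
--     :param corpus: The corpus as a list of sentences, with each sentence being a list of words.
--     :return: A dictionary where keys are the first words of bigrams, and values are dictionaries of the second words and their counts.
--     """
--     bigram_counts = {}
--     for sentence in corpus:
--         for i in range(len(sentence)-1):
--             if sentence[i] in bigram_counts:
--                 if sentence[i+1] in bigram_counts[sentence[i]]:
--                     bigram_counts[sentence[i]][sentence[i+1]] += 1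
--                 else:
--                     bigram_counts[sentence[i]][sentence[i+1]] = 1
--             else:
--                 bigram_counts[sentence[i]] = {sentence[i+1]: 1}
--     return bigram_counts
-- ===== SOURCE B (Python) =====
-- def count_bigrams(corpus):
--     """Two-pass rewrite: first build a single flat tally keyed by the (w1, w2)
--     tuple, then regroup that table into the nested dict in a second pass."""
--     tally = {}
--     for sentence in corpus:
--         for pair in zip(sentence, sentence[1:]):
--             tally[pair] = tally.get(pair, 0) + 1
--     result = {}
--     for (w1, w2), count in tally.items():
--         result.setdefault(w1, {})[w2] = count
--     return result
-- ===== Notes on version B (the rewrite author's own statement) =====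
-- stated objective: alternative
-- what changed: Replaces A's single pass of nested conditional dict updates with two distinct passes: first a flat tally keyed by the (w1, w2) tuple built with zip(sentence, sentence[1:]), then a separate regroup pass that reshapes the tally into the nested dict via setdefault.
import Mathlib
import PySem

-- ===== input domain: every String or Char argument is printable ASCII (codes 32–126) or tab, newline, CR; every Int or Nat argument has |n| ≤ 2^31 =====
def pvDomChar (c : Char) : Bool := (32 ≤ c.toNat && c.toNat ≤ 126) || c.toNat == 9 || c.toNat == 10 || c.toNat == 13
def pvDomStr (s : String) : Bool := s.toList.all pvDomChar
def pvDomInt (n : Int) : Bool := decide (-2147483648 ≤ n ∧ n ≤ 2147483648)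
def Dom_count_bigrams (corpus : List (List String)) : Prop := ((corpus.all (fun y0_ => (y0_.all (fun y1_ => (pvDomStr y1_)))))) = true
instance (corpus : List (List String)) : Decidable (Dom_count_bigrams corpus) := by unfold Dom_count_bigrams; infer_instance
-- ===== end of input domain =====

-- B rebuilds the bigram table in two passes (flat tuple-keyed tally, then regroup) instead of
-- A's single pass of nested conditional dict updates; same return value, similar cost.

-- ===== PORT A =====
-- A's inner loop indexes sentence[i] / sentence[i+1] for i in range(len(sentence)-1);
-- both indices are always in range there, so pyGetD's default is never used.
def count_bigrams (corpus : List (List String)) : List (String × List (String × Int)) :=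
  (corpus.foldl (fun bc sentence =>
      (PySem.List.pyRange 0 ((sentence.length : Int) - 1) 1).foldl (fun bc i =>
        let w1 := PySem.List.pyGetD sentence i ""
        let w2 := PySem.List.pyGetD sentence (i + 1) ""
        if bc.contains w1 then
          if (bc.getD w1 PySem.Dict.empty).contains w2 then
            bc.insert w1 ((bc.getD w1 PySem.Dict.empty).insert w2
              ((bc.getD w1 PySem.Dict.empty).getD w2 0 + 1))
          else
            bc.insert w1 ((bc.getD w1 PySem.Dict.empty).insert w2 1)
        else
          bc.insert w1 (PySem.Dict.ofList [(w2, 1)])) bc)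
    (PySem.Dict.empty : PySem.Dict String (PySem.Dict String Int))).items.map
    (fun p => (p.1, p.2.items))

-- ===== PORT B =====
-- 'result.setdefault(w1, {})[w2] = c' is ported as the net effect on result:
-- the inner dict at w1 (empty if absent) gains key w2 ↦ c, keeping w1's position.
def count_bigrams_alt (corpus : List (List String)) : List (String × List (String × Int)) :=
  ((((corpus.foldl (fun t sentence =>
      (sentence.zip (PySem.List.slice sentence (some 1) none)).foldl
        (fun t pair => t.insert pair (t.getD pair 0 + 1)) t)
      (PySem.Dict.empty : PySem.Dict (String × String) Int)).items).foldl (fun r q =>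
      r.insert q.1.1 ((r.getD q.1.1 PySem.Dict.empty).insert q.1.2 q.2))
      (PySem.Dict.empty : PySem.Dict String (PySem.Dict String Int))).items).map
    (fun p => (p.1, p.2.items))

-- ===== PRECONDITION & SPEC =====
def Spec_count_bigrams (corpus : List (List String)) (out : List (String × List (String × Int))) : Prop := out = count_bigrams_alt corpus
instance (corpus : List (List String)) (out : List (String × List (String × Int))) : Decidable (Spec_count_bigrams corpus out) := by unfold Spec_count_bigrams; infer_instance

-- ===== CLAIM (what is proved, stated in full; the proofs are below) =====
def Claim_equal_count_bigrams : Prop := ∀ (corpus : List (List String)), Dom_count_bigrams corpus → Spec_count_bigrams corpus (count_bigrams corpus)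

-- ===== LEMMAS AND PROOFS =====

-- the uniform shape of A's loop body, and the flat bigram stream both programs consume
def uStep (bc : PySem.Dict String (PySem.Dict String Int)) (p : String × String) :
    PySem.Dict String (PySem.Dict String Int) :=
  bc.insert p.1 ((bc.getD p.1 PySem.Dict.empty).insert p.2
    ((bc.getD p.1 PySem.Dict.empty).getD p.2 0 + 1))

def bStep (r : PySem.Dict String (PySem.Dict String Int)) (q : (String × String) × Int) :
    PySem.Dict String (PySem.Dict String Int) :=
  r.insert q.1.1 ((r.getD q.1.1 PySem.Dict.empty).insert q.1.2 q.2)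

def pairsOf (corpus : List (List String)) : List (String × String) :=
  (corpus.map (fun s => s.zip s.tail)).flatten

-- Set.ofList facts used to align the two key orders
theorem set_ofList_append_singleton {α : Type} [BEq α] (xs : List α) (x : α) :
    PySem.Set.ofList (xs ++ [x]) = PySem.Set.add (PySem.Set.ofList xs) x := by
  simp [PySem.Set.ofList_eq_foldl]

theorem set_add_of_mem {α : Type} [BEq α] [LawfulBEq α] (s : PySem.Set α) (x : α)
    (h : x ∈ s) : PySem.Set.add s x = s := by
  simp [PySem.Set.add, PySem.Set.contains, h]

theorem set_add_of_not_mem {α : Type} [BEq α] [LawfulBEq α] (s : PySem.Set α) (x : α)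
    (h : ¬ x ∈ s) : PySem.Set.add s x = s ++ [x] := by
  simp [PySem.Set.add, PySem.Set.contains, h]

theorem set_ofList_map_ofList {α β : Type} [BEq α] [LawfulBEq α] [BEq β] [LawfulBEq β]
    (f : α → β) (xs : List α) :
    PySem.Set.ofList ((PySem.Set.ofList xs).map f) = PySem.Set.ofList (xs.map f) := by
  induction xs using List.reverseRecOn with
  | nil => rfl
  | append_singleton xs x ih =>
    rw [set_ofList_append_singleton]
    by_cases h : x ∈ PySem.Set.ofList xs
    · rw [set_add_of_mem _ _ h, ih, List.map_append, List.map_singleton,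
        set_ofList_append_singleton, set_add_of_mem]
      rw [PySem.Set.mem_ofList] at h ⊢
      exact List.mem_map_of_mem h
    · rw [set_add_of_not_mem _ _ h, List.map_append, List.map_singleton,
        set_ofList_append_singleton, ih, List.map_append, List.map_singleton,
        set_ofList_append_singleton]

theorem set_ofList_filter {α : Type} [BEq α] [LawfulBEq α] (p : α → Bool) (xs : List α) :
    PySem.Set.ofList (xs.filter p) = (PySem.Set.ofList xs).filter p := by
  induction xs using List.reverseRecOn with
  | nil => rfl
  | append_singleton xs x ih =>
    rw [set_ofList_append_singleton, List.filter_append]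
    by_cases hp : p x
    · rw [show List.filter p [x] = [x] by simp [hp],
        set_ofList_append_singleton, ih]
      by_cases h : x ∈ PySem.Set.ofList xs
      · rw [set_add_of_mem _ _ h, set_add_of_mem _ _ (List.mem_filter.2 ⟨h, hp⟩)]
      · rw [set_add_of_not_mem _ _ h, List.filter_append,
          show List.filter p [x] = [x] by simp [hp],
          set_add_of_not_mem]
        intro hmem
        exact h (List.mem_of_mem_filter hmem)
    · rw [show List.filter p [x] = [] by simp [hp], List.append_nil, ih]
      by_cases h : x ∈ PySem.Set.ofList xs
      · rw [set_add_of_mem _ _ h]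
      · rw [set_add_of_not_mem _ _ h, List.filter_append,
          show List.filter p [x] = [] by simp [hp], List.append_nil]

theorem set_ofList_map_inj {α β : Type} [BEq α] [LawfulBEq α] [BEq β] [LawfulBEq β]
    (f : α → β) (xs : List α)
    (hinj : ∀ a ∈ xs, ∀ b ∈ xs, f a = f b → a = b) :
    PySem.Set.ofList (xs.map f) = (PySem.Set.ofList xs).map f := by
  induction xs using List.reverseRecOn with
  | nil => rfl
  | append_singleton xs x ih =>
    have hinj' : ∀ a ∈ xs, ∀ b ∈ xs, f a = f b → a = b := fun a ha b hb =>
      hinj a (by simp [ha]) b (by simp [hb])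
    rw [List.map_append, List.map_singleton, set_ofList_append_singleton,
      set_ofList_append_singleton, ih hinj']
    by_cases h : x ∈ PySem.Set.ofList xs
    · rw [set_add_of_mem _ _ h, set_add_of_mem _ _ (List.mem_map_of_mem h)]
    · rw [set_add_of_not_mem _ _ h, set_add_of_not_mem, List.map_append, List.map_singleton]
      intro hmem
      obtain ⟨a, ha, hfa⟩ := List.mem_map.1 hmem
      have hax : a = x := hinj a (by simp [(PySem.Set.mem_ofList _ _).1 ha]) x (by simp) hfa
      exact h (hax ▸ ha)

-- A's indexed inner loop is the fold over adjacent pairs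
theorem range_map_adj (l : List String) :
    (List.range (l.length - 1)).map (fun k => (l.getD k "", l.getD (k + 1) "")) =
      l.zip l.tail := by
  induction l with
  | nil => rfl
  | cons x t ih =>
    cases t with
    | nil => rfl
    | cons y t2 =>
      simp only [List.length_cons, Nat.add_sub_cancel, List.range_succ_eq_map,
        List.map_cons, List.map_map]
      refine congrArg₂ _ rfl ?_
      simpa using ih

theorem inner_fold_eq_zip (g : PySem.Dict String (PySem.Dict String Int) →
      (String × String) → PySem.Dict String (PySem.Dict String Int))
    (s : List String) (init : PySem.Dict String (PySem.Dict String Int)) :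
    (PySem.List.pyRange 0 ((s.length : Int) - 1) 1).foldl
        (fun bc i => g bc (PySem.List.pyGetD s i "", PySem.List.pyGetD s (i + 1) "")) init =
      (s.zip s.tail).foldl g init := by
  cases s with
  | nil => rfl
  | cons x t =>
    have hlen : (((x :: t).length : Int) - 1) = (((x :: t).length - 1 : Nat) : Int) := by
      simp [List.length_cons]
    rw [hlen, PySem.List.pyRange_zero_natCast, List.foldl_map, ← range_map_adj (x :: t),
      List.foldl_map]
    refine PySem.List.foldl_congr_mem _ _ _ _ (fun acc k _ => ?_)
    have h1 : ((k : Int) + 1) = ((k + 1 : Nat) : Int) := by push_cast; ring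
    rw [h1, PySem.List.pyGetD_natCast, PySem.List.pyGetD_natCast]

-- A's three-branch body is the uniform step
theorem aBody_eq_uStep (bc : PySem.Dict String (PySem.Dict String Int)) (w1 w2 : String) :
    (if bc.contains w1 then
        if (bc.getD w1 PySem.Dict.empty).contains w2 then
          bc.insert w1 ((bc.getD w1 PySem.Dict.empty).insert w2
            ((bc.getD w1 PySem.Dict.empty).getD w2 0 + 1))
        else
          bc.insert w1 ((bc.getD w1 PySem.Dict.empty).insert w2 1)
      else
        bc.insert w1 (PySem.Dict.ofList [(w2, 1)])) = uStep bc (w1, w2) := by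
  unfold uStep
  dsimp only
  by_cases h1 : bc.contains w1
  · rw [if_pos h1]
    by_cases h2 : (bc.getD w1 PySem.Dict.empty).contains w2
    · rw [if_pos h2]
    · rw [if_neg h2,
        PySem.Dict.getD_of_not_contains (bc.getD w1 PySem.Dict.empty) (0 : Int)
          (eq_false_of_ne_true h2)]
      norm_num
  · rw [if_neg h1,
      PySem.Dict.getD_of_not_contains bc (PySem.Dict.empty : PySem.Dict String Int)
        (eq_false_of_ne_true h1),
      PySem.Dict.getD_empty]
    norm_num
    rfl

theorem count_bigrams_eq_uFold (corpus : List (List String)) :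
    count_bigrams corpus =
      ((pairsOf corpus).foldl uStep PySem.Dict.empty).items.map (fun p => (p.1, p.2.items)) := by
  unfold count_bigrams pairsOf
  rw [List.foldl_flatten, List.foldl_map]
  congr 2
  refine PySem.List.foldl_congr_mem _ _ _ _ (fun acc s _ => ?_)
  rw [← inner_fold_eq_zip uStep s acc]
  refine PySem.List.foldl_congr_mem _ _ _ _ (fun acc2 i _ => ?_)
  exact aBody_eq_uStep acc2 _ _

theorem alt_eq_bFold (corpus : List (List String)) :
    count_bigrams_alt corpus =
      ((PySem.Dict.counter (pairsOf corpus)).items.foldl bStep PySem.Dict.empty).items.map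
        (fun p => (p.1, p.2.items)) := by
  have htally : (corpus.foldl (fun t sentence =>
      (sentence.zip (PySem.List.slice sentence (some 1) none)).foldl
        (fun t pair => t.insert pair (t.getD pair 0 + 1)) t)
      (PySem.Dict.empty : PySem.Dict (String × String) Int)) =
      PySem.Dict.counter (pairsOf corpus) := by
    rw [← PySem.Dict.foldl_insert_getD_add_one_eq_counter]
    unfold pairsOf
    rw [List.foldl_flatten, List.foldl_map]
    refine PySem.List.foldl_congr_mem _ _ _ _ (fun acc s _ => ?_)
    rw [PySem.List.slice_from_one]
  unfold count_bigrams_alt bStep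
  rw [htally]

-- per-key view of A's fold: each first word collects the counter of its second words
theorem getD_uFold (ps : List (String × String)) (r : PySem.Dict String (PySem.Dict String Int))
    (w1 : String) :
    (ps.foldl uStep r).getD w1 PySem.Dict.empty =
      ((ps.filter (fun q => q.1 == w1)).map (fun q => q.2)).foldl
        (fun d x => d.insert x (d.getD x 0 + 1)) (r.getD w1 PySem.Dict.empty) := by
  induction ps generalizing r with
  | nil => rfl
  | cons q ps ih =>
    rw [List.foldl_cons, ih]
    by_cases h : q.1 = w1
    · simp only [List.filter_cons, h, beq_self_eq_true, if_pos, List.map_cons, List.foldl_cons,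
        uStep]
      rw [PySem.Dict.getD_insert_self]
    · have hb : (q.1 == w1) = false := beq_eq_false_iff_ne.2 h
      simp only [List.filter_cons, hb, Bool.false_eq_true, if_false, uStep]
      rw [PySem.Dict.getD_insert_of_ne _ _ _ (fun hh => h hh.symm)]

-- per-key view of B's regrouping pass
theorem getD_bFold (l : List ((String × String) × Int))
    (r : PySem.Dict String (PySem.Dict String Int)) (w1 : String) :
    (l.foldl bStep r).getD w1 PySem.Dict.empty =
      ((l.filter (fun q => q.1.1 == w1)).map (fun q => (q.1.2, q.2))).foldl
        (fun d x => d.insert x.1 x.2) (r.getD w1 PySem.Dict.empty) := by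
  induction l generalizing r with
  | nil => rfl
  | cons q l ih =>
    rw [List.foldl_cons, ih]
    by_cases h : q.1.1 = w1
    · simp only [List.filter_cons, h, beq_self_eq_true, if_pos, List.map_cons, List.foldl_cons,
        bStep]
      rw [PySem.Dict.getD_insert_self]
    · have hb : (q.1.1 == w1) = false := beq_eq_false_iff_ne.2 h
      simp only [List.filter_cons, hb, Bool.false_eq_true, if_false, bStep]
      rw [PySem.Dict.getD_insert_of_ne _ _ _ (fun hh => h hh.symm)]

-- counting a second word among pairs with a fixed first word counts the pair
theorem count_snd_filter (ps : List (String × String)) (k : String × String) :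
    ((ps.filter (fun q => q.1 == k.1)).map (fun q => q.2)).count k.2 = ps.count k := by
  simp only [List.count, List.countP_map, List.countP_filter]
  refine List.countP_congr (fun q _ => ?_)
  obtain ⟨q1, q2⟩ := q; obtain ⟨k1, k2⟩ := k
  simp [Function.comp, and_comm]

-- the two inner dictionaries agree at every first word
theorem inner_eq (ps : List (String × String)) (w1 : String) :
    ((ps.foldl uStep PySem.Dict.empty).getD w1 PySem.Dict.empty) =
      (((PySem.Dict.counter ps).items.foldl bStep PySem.Dict.empty).getD w1 PySem.Dict.empty) := by
  rw [getD_uFold, getD_bFold, PySem.Dict.getD_empty,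
    PySem.Dict.foldl_insert_getD_add_one_eq_counter, PySem.Dict.items_counter,
    List.filter_map, List.map_map]
  have hfilt : ((fun q : (String × String) × Int => q.1.1 == w1) ∘
      fun k => (k, (ps.count k : Int))) = fun k : String × String => k.1 == w1 := rfl
  rw [hfilt]
  set Sfilt := (PySem.Set.ofList ps).filter (fun k => k.1 == w1) with hS
  have hmemS : ∀ k ∈ Sfilt, k.1 = w1 := fun k hk => by
    have := List.of_mem_filter hk
    simpa using this
  -- right side: fresh distinct keys append one by one
  have hkeysnodup : (Sfilt.map (fun k : String × String => k.2)).Nodup := by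
    refine ((PySem.Set.nodup_ofList ps).filter _).map_on ?_
    intro a ha b hb hab
    exact Prod.ext (by rw [hmemS a ha, hmemS b hb]) hab
  have hfresh := PySem.Dict.items_foldl_insert_fresh
      (l := Sfilt.map (fun k => (k.2, (ps.count k : Int))))
      (k := fun a => a.1) (v := fun a => a.2) (d := PySem.Dict.empty)
      (by intro a _; exact PySem.Dict.contains_empty _)
      (by simpa [List.map_map, Function.comp_def] using hkeysnodup)
  apply PySem.Dict.ext
  rw [show (fun d : PySem.Dict String Int => fun x : String × Int => d.insert x.1 x.2) =
      (fun d x => d.insert ((fun a : String × Int => a.1) x) ((fun a : String × Int => a.2) x))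
      from rfl] at *
  simp only [Function.comp_def]
  rw [hfresh]
  -- left side: items of the counter of the second words
  have hinj2 : ∀ a ∈ ps.filter (fun q => q.1 == w1), ∀ b ∈ ps.filter (fun q => q.1 == w1),
      (fun q : String × String => q.2) a = (fun q : String × String => q.2) b → a = b := by
    intro a ha b hb hab
    have ha' := List.mem_filter.1 ha
    have hb' := List.mem_filter.1 hb
    exact Prod.ext (by rw [show a.1 = w1 by simpa using ha'.2,
      show b.1 = w1 by simpa using hb'.2]) hab
  rw [PySem.Dict.items_counter,
    set_ofList_map_inj (fun q : String × String => q.2) (ps.filter (fun q => q.1 == w1)) hinj2,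
    set_ofList_filter, List.map_map]
  simp only [Function.comp_def]
  rw [show (PySem.Dict.empty : PySem.Dict String Int).items = [] from rfl, List.nil_append,
    show (fun a : String × Int => (a.1, a.2)) = id from rfl, List.map_id]
  refine List.map_congr_left (fun k hk => ?_)
  have h1 : k.1 = w1 := hmemS k hk
  have hc := count_snd_filter ps k
  rw [h1] at hc
  rw [hc]

-- the two outer key lists agree
theorem keys_eq (ps : List (String × String)) :
    (ps.foldl uStep PySem.Dict.empty).keys =
      ((PySem.Dict.counter ps).items.foldl bStep PySem.Dict.empty).keys := by
  rw [show uStep = (fun d p => d.insert ((fun q : String × String => q.1) p)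
        ((fun d (p : String × String) => (d.getD p.1 PySem.Dict.empty).insert p.2
          ((d.getD p.1 PySem.Dict.empty).getD p.2 0 + 1)) d p)) from rfl,
    PySem.Dict.keys_foldl_insert_key,
    show bStep = (fun d q => d.insert ((fun q : (String × String) × Int => q.1.1) q)
        ((fun d (q : (String × String) × Int) =>
          (d.getD q.1.1 PySem.Dict.empty).insert q.1.2 q.2) d q)) from rfl,
    PySem.Dict.keys_foldl_insert_key, PySem.Dict.keys_empty, PySem.Dict.items_counter,
    List.map_map]
  show PySem.Set.update [] (ps.map (fun q => q.1)) =
    PySem.Set.update [] ((PySem.Set.ofList ps).map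
      ((fun q : (String × String) × Int => q.1.1) ∘ fun k => (k, (ps.count k : Int))))
  rw [show ((fun q : (String × String) × Int => q.1.1) ∘
      fun k : String × String => (k, (ps.count k : Int))) = fun k : String × String => k.1
      from rfl]
  show PySem.Set.ofList (ps.map (fun q => q.1)) =
    PySem.Set.ofList ((PySem.Set.ofList ps).map (fun k => k.1))
  rw [set_ofList_map_ofList]

theorem dict_eq (ps : List (String × String)) :
    ps.foldl uStep PySem.Dict.empty =
      (PySem.Dict.counter ps).items.foldl bStep PySem.Dict.empty := by
  have hA : (ps.foldl uStep PySem.Dict.empty).keys.Nodup := by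
    rw [show uStep = (fun d p => d.insert ((fun q : String × String => q.1) p)
        ((fun d (p : String × String) => (d.getD p.1 PySem.Dict.empty).insert p.2
          ((d.getD p.1 PySem.Dict.empty).getD p.2 0 + 1)) d p)) from rfl]
    exact PySem.Dict.nodup_keys_foldl_insert_key _ _ _ _ (by simp)
  have hB : ((PySem.Dict.counter ps).items.foldl bStep PySem.Dict.empty).keys.Nodup := by
    rw [show bStep = (fun d q => d.insert ((fun q : (String × String) × Int => q.1.1) q)
        ((fun d (q : (String × String) × Int) =>
          (d.getD q.1.1 PySem.Dict.empty).insert q.1.2 q.2) d q)) from rfl]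
    exact PySem.Dict.nodup_keys_foldl_insert_key _ _ _ _ (by simp)
  apply PySem.Dict.ext
  rw [PySem.Dict.items_eq_map_keys _ hA PySem.Dict.empty,
    PySem.Dict.items_eq_map_keys _ hB PySem.Dict.empty, ← keys_eq]
  exact List.map_congr_left (fun k _ => by rw [inner_eq])

-- ===== VERDICT (by name: the statement is the Claim_ definition above) =====
theorem count_bigrams_spec : Claim_equal_count_bigrams := by
  intro corpus _
  show count_bigrams corpus = count_bigrams_alt corpus
  rw [count_bigrams_eq_uFold, alt_eq_bFold, dict_eq]
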